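-- pv_equiv track=rewrite | github.com/rslabon/aoc2016 | day7.py | has_ttl
-- ===== SOURCE A (Python) =====
-- def is_abba(s):
--     start = 0
--     end = 4
--     while end <= len(s):
--         window = s[start:end]
--         if window[0] == window[3] and window[1] == window[2] and window[0] != window[1]:
--             return True
--         start += 1
--         end += 1
--
--     return False
--
-- def has_ttl(outside, inside):
--     found = 0
--     for s in outside:
--         if is_abba(s):
--             found = 1
--
--     for s in inside:
--         if is_abba(s):
--             found = 0
--
--     return found == 1
-- ===== SOURCE B (Python) =====
-- import re
--
-- _ABBA = re.compile(r'(.)(?!\1)(.)\2\1', re.DOTALL)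
--
-- def has_ttl(outside, inside):
--     return any(_ABBA.search(s) for s in outside) and \
--            not any(_ABBA.search(s) for s in inside)
-- ===== Notes on version B (the rewrite author's own statement) =====
-- stated objective: faster
-- what changed: is_abba's hand-rolled sliding-window scan is replaced by a regex-engine search for the pattern (.)(?!\1)(.)\2\1 (with DOTALL so '.' matches newlines), and the mutable 0/1 flag set by one loop and cleared by the other is replaced by the boolean expression any(outside) and not any(inside); the compiled C regex engine makes B measurably faster.
import Mathlib
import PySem

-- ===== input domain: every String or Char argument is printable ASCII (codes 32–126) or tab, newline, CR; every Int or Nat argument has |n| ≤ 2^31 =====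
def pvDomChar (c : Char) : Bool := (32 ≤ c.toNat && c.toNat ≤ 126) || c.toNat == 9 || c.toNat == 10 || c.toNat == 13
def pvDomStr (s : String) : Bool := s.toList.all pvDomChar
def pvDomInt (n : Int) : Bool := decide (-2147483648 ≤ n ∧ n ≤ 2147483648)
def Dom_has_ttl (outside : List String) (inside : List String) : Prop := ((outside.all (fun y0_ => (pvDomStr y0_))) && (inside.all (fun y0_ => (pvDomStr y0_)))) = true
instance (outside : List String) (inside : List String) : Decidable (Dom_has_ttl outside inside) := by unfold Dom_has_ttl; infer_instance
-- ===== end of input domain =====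

-- B replaces A's hand-rolled sliding-window is_abba with a regex-engine search for
-- (.)(?!\1)(.)\2\1 (DOTALL), and A's mutable 0/1 flag with any(outside) and not any(inside).

-- ===== PORT A =====
-- while end <= len(s): window = s[start:end]; check; start += 1; end += 1
def isAbbaLoop (cs : List Char) (start e : Nat) : Bool :=
  if _h : e ≤ cs.length then
    let window := (cs.drop start).take (e - start)
    if window.getD 0 ' ' == window.getD 3 ' ' &&
       window.getD 1 ' ' == window.getD 2 ' ' &&
       !(window.getD 0 ' ' == window.getD 1 ' ') then
      true
    else
      isAbbaLoop cs (start + 1) (e + 1)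
  else
    false
termination_by cs.length + 1 - e

def is_abba (s : String) : Bool := isAbbaLoop s.toList 0 4

def has_ttl (outside : List String) (inside : List String) : Bool :=
  let found : Int := outside.foldl (fun found s => if is_abba s then 1 else found) 0
  let found : Int := inside.foldl (fun found s => if is_abba s then 0 else found) found
  found == 1

-- ===== PORT B =====
-- re.search hand-ported (no regex engine in Lean; exact on all inputs): the engine tries the
-- pattern at each successive start position.  One attempt of (.)(?!\1)(.)\2\1 at a position:
-- '(.)' consumes a char a (DOTALL: any char), '(?!\1)' asserts the next char is not a,
-- '(.)' consumes b, '\2' requires b again, '\1' requires a again.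
def reAbbaTryHere (a : Char) (rest : List Char) : Bool :=
  match rest with
  | b :: c :: d :: _ => !(b == a) && (c == b) && (d == a)
  | _ => false

def reAbbaSearch : List Char → Bool
  | [] => false
  | a :: rest => reAbbaTryHere a rest || reAbbaSearch rest

def is_abba_b (s : String) : Bool := reAbbaSearch s.toList

def has_ttl_alt (outside : List String) (inside : List String) : Bool :=
  outside.any (fun s => is_abba_b s) && !(inside.any (fun s => is_abba_b s))

-- ===== PRECONDITION & SPEC =====
def Spec_has_ttl (outside : List String) (inside : List String) (out : Bool) : Prop := out = has_ttl_alt outside inside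
instance (outside : List String) (inside : List String) (out : Bool) : Decidable (Spec_has_ttl outside inside out) := by unfold Spec_has_ttl; infer_instance

-- ===== CLAIM (what is proved, stated in full; the proofs are below) =====
def Claim_equal_has_ttl : Prop := ∀ (outside : List String) (inside : List String), Dom_has_ttl outside inside → Spec_has_ttl outside inside (has_ttl outside inside)

-- ===== LEMMAS AND PROOFS =====

-- Shifting both indices together with a cons on the list does not change A's loop.
theorem isAbbaLoop_shift (n : Nat) : ∀ (cs : List Char) (a : Char) (s e : Nat),
    cs.length + 1 - e ≤ n →
    isAbbaLoop (a :: cs) (s + 1) (e + 1) = isAbbaLoop cs s e := by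
  induction n with
  | zero =>
    intro cs a s e hn
    conv_lhs => rw [isAbbaLoop.eq_def]
    rw [dif_neg (show ¬ (e + 1 ≤ (a :: cs).length) by
      simp only [List.length_cons]; omega)]
    conv_rhs => rw [isAbbaLoop.eq_def]
    rw [dif_neg (show ¬ (e ≤ cs.length) by omega)]
  | succ n ih =>
    intro cs a s e hn
    conv_lhs => rw [isAbbaLoop.eq_def]
    conv_rhs => rw [isAbbaLoop.eq_def]
    by_cases he : e ≤ cs.length
    · rw [dif_pos (show e + 1 ≤ (a :: cs).length by
        simp only [List.length_cons]; omega), dif_pos he]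
      simp only [List.drop_succ_cons, Nat.add_sub_add_right]
      split_ifs
      · rfl
      · exact ih cs a (s + 1) (e + 1) (by omega)
    · rw [dif_neg (show ¬ (e + 1 ≤ (a :: cs).length) by
        simp only [List.length_cons]; omega), dif_neg he]

theorem isAbbaLoop_eq_search (cs : List Char) :
    isAbbaLoop cs 0 4 = reAbbaSearch cs := by
  induction cs with
  | nil => rw [isAbbaLoop.eq_def]; simp [reAbbaSearch]
  | cons a t ih =>
    match t with
    | [] => rw [isAbbaLoop.eq_def]; simp [reAbbaSearch, reAbbaTryHere]
    | [b] => rw [isAbbaLoop.eq_def]; simp [reAbbaSearch, reAbbaTryHere]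
    | [b, c] => rw [isAbbaLoop.eq_def]; simp [reAbbaSearch, reAbbaTryHere]
    | b :: c :: d :: r =>
      rw [isAbbaLoop.eq_def]
      have h4 : 4 ≤ (a :: b :: c :: d :: r).length := by simp
      rw [dif_pos h4]
      have hshift : isAbbaLoop (a :: b :: c :: d :: r) (0 + 1) (4 + 1)
          = isAbbaLoop (b :: c :: d :: r) 0 4 :=
        isAbbaLoop_shift ((b :: c :: d :: r).length + 1) (b :: c :: d :: r) a 0 4 (by omega)
      rw [hshift, ih]
      simp only [Nat.sub_zero, List.drop_zero, List.take_succ_cons, List.take_zero,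
        List.getD_cons_zero, List.getD_cons_succ, reAbbaSearch, reAbbaTryHere]
      rw [show (a == d) = (d == a) from BEq.comm, show (b == c) = (c == b) from BEq.comm,
        show (a == b) = (b == a) from BEq.comm]
      cases hx : (b == a) <;> cases hy : (c == b) <;> cases hz : (d == a) <;>
        simp [hx, hy, hz]

theorem is_abba_eq (s : String) : is_abba s = is_abba_b s := by
  unfold is_abba is_abba_b
  exact isAbbaLoop_eq_search s.toList

-- A flag loop that only ever assigns the constant c ends at c iff some element fires.
theorem foldl_set (p : String → Bool) (c : Int) (l : List String) (acc : Int) :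
    l.foldl (fun f s => if p s then c else f) acc
      = if l.any p then c else acc := by
  induction l generalizing acc with
  | nil => simp
  | cons x t ih =>
    simp only [List.foldl_cons, List.any_cons, ih]
    by_cases hx : p x = true <;> simp [hx]

-- ===== VERDICT (by name: the statement is the Claim_ definition above) =====
theorem has_ttl_spec : Claim_equal_has_ttl := by
  intro outside inside _
  unfold Spec_has_ttl has_ttl has_ttl_alt
  simp only [foldl_set, List.any_congr rfl is_abba_eq]
  cases ho : outside.any (fun s => is_abba_b s) <;>
    cases hi : inside.any (fun s => is_abba_b s) <;>
      simp
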